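-- pv_equiv track=rewrite | github.com/bopopescu/lazero | justImport.py | getFinal
-- ===== SOURCE A (Python) =====
-- def getFinal(b, a):
--     # first bracket.
--     c = a[len(b):]
--     d = ""
--     e = [" ", "(", ":"]
--     # hook in.
--     for x in c:
--         if x in e:
--             if d == "":
--                 pass
--             else:
--                 return d
--         else:
--             d += x
-- ===== SOURCE B (Python) =====
-- def getFinal(b, a):
--     # Strip leading separators, then return the first separator-terminated token (None if unterminated).
--     seps = " (:"
--     t = a[len(b):].lstrip(seps)
--     for j, x in enumerate(t):
--         if x in seps:
--             return t[:j]
--     return None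
-- ===== Notes on version B (the rewrite author's own statement) =====
-- stated objective: idiomatic
-- what changed: Replaced A's single accumulator loop (building the token char-by-char with early return) by lstrip of the separator set followed by an enumerate scan that slices the token out by index.
import Mathlib
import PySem

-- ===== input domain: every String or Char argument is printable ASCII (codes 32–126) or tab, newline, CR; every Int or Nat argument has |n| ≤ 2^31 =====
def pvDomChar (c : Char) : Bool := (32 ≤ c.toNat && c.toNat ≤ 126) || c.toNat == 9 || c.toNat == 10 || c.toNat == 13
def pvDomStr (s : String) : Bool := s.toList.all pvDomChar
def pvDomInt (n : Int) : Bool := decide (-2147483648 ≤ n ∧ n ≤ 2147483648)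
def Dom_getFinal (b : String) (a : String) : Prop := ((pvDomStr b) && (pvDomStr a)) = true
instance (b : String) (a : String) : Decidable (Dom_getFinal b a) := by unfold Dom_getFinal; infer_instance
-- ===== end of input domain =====

-- B rewrites A's accumulator loop as lstrip of the separators followed by an index/slice scan (idiomatic).

-- ===== PORT A =====
-- the 'for x in c' loop of A, with accumulator d (a Python str, carried as List Char)
def getFinalLoopA (e : List Char) : List Char → List Char → Option String
  | [], _ => none                                   -- loop falls off the end: function returns None
  | x :: xs, d =>
    if x ∈ e then
      (if d = [] then getFinalLoopA e xs d else some (String.ofList d))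
    else
      getFinalLoopA e xs (d ++ [x])                 -- d += x

def getFinal (b : String) (a : String) : Option String :=
  let c := PySem.List.slice a.toList (some (PySem.Str.len b)) none   -- c = a[len(b):]
  let e : List Char := [' ', '(', ':']
  getFinalLoopA e c []                                               -- d = ""; for x in c: …

-- ===== PORT B =====
-- the 'for j, x in enumerate(t)' loop of B: first separator index j returns t[:j]
def getFinalLoopB (seps : List Char) : List Char → Nat → List Char → Option String
  | [], _, _ => none                                -- loop ends: return None
  | x :: xs, j, t =>
    if x ∈ seps then some (String.ofList (t.take j))  -- return t[:j]  (j ≥ 0, so t[:j] is take j)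
    else getFinalLoopB seps xs (j + 1) t

def getFinal_alt (b : String) (a : String) : Option String :=
  let seps : List Char := [' ', '(', ':']
  -- t = a[len(b):].lstrip(seps); lstrip with a char set is exactly dropWhile of membership in that set
  let t := (PySem.List.slice a.toList (some (PySem.Str.len b)) none).dropWhile (fun x => decide (x ∈ seps))
  getFinalLoopB seps t 0 t

-- ===== PRECONDITION & SPEC =====
def Spec_getFinal (b : String) (a : String) (out : Option String) : Prop := out = getFinal_alt b a
instance (b : String) (a : String) (out : Option String) : Decidable (Spec_getFinal b a out) := by unfold Spec_getFinal; infer_instance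

-- ===== CLAIM (what is proved, stated in full; the proofs are below) =====
def Claim_equal_getFinal : Prop := ∀ (b : String) (a : String), Dom_getFinal b a → Spec_getFinal b a (getFinal b a)

-- ===== LEMMAS AND PROOFS =====

-- A's loop with empty accumulator skips leading separators
theorem loopA_dropWhile (e : List Char) (l : List Char) :
    getFinalLoopA e l [] = getFinalLoopA e (l.dropWhile (fun x => decide (x ∈ e))) [] := by
  induction l with
  | nil => rfl
  | cons x xs ih =>
    by_cases hx : x ∈ e
    · simp [getFinalLoopA, hx, ih]
    · simp [hx]

-- A's loop with a nonempty accumulator: first separator terminates, appending the non-separator prefix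
theorem loopA_char (e : List Char) (l : List Char) (d : List Char) (hd : d ≠ []) :
    getFinalLoopA e l d =
      if l.any (fun x => decide (x ∈ e)) then
        some (String.ofList (d ++ l.takeWhile (fun x => decide (¬ x ∈ e))))
      else none := by
  induction l generalizing d with
  | nil => simp [getFinalLoopA]
  | cons x xs ih =>
    by_cases hx : x ∈ e
    · simp [getFinalLoopA, hx, hd]
    · simp [getFinalLoopA, hx, List.any_cons, ih (d ++ [x]) (by simp)]

-- B's loop: invariant 't.take j ++ l = t'
theorem loopB_char (seps : List Char) (l : List Char) (j : Nat) (t : List Char)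
    (h : t.take j ++ l = t) :
    getFinalLoopB seps l j t =
      if l.any (fun x => decide (x ∈ seps)) then
        some (String.ofList (t.take j ++ l.takeWhile (fun x => decide (¬ x ∈ seps))))
      else none := by
  induction l generalizing j with
  | nil => simp [getFinalLoopB]
  | cons x xs ih =>
    have hlt : j < t.length := by
      by_contra hc
      have ht' : t.take j = t := List.take_of_length_le (by omega)
      rw [ht'] at h
      have := congrArg List.length h
      simp at this
    have hlen : (t.take j).length = j := by simp [List.length_take]; omega
    have hgx : t[j]? = some x := by
      conv_lhs => rw [← h]
      rw [List.getElem?_append_right (hlen.le), hlen]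
      simp
    have hj : t.take (j + 1) = t.take j ++ [x] := by
      rw [List.take_add_one, hgx]
      rfl
    by_cases hx : x ∈ seps
    · simp [getFinalLoopB, hx]
    · have h' : t.take (j + 1) ++ xs = t := by
        rw [hj]; simpa using h
      simp only [getFinalLoopB, if_neg (by simpa using hx)]
      rw [ih (j + 1) h', hj]
      simp [hx]

-- head of the dropWhile result is not a separator
theorem head_dropWhile_not (p : Char → Bool) (l : List Char) (x : Char) (xs : List Char)
    (h : l.dropWhile p = x :: xs) : p x = false := by
  have := List.head?_dropWhile_not p l
  rw [h] at this
  simpa using this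

-- both ports agree on the common suffix c
theorem getFinal_eq_on (c : List Char) :
    getFinalLoopA [' ', '(', ':'] c [] =
    getFinalLoopB [' ', '(', ':']
      (c.dropWhile (fun x => decide (x ∈ ([' ', '(', ':'] : List Char)))) 0
      (c.dropWhile (fun x => decide (x ∈ ([' ', '(', ':'] : List Char)))) := by
  rw [loopA_dropWhile]
  cases htt : c.dropWhile (fun x => decide (x ∈ ([' ', '(', ':'] : List Char))) with
  | nil => simp [getFinalLoopA, getFinalLoopB]
  | cons x xs =>
    have hx : x ∉ ([' ', '(', ':'] : List Char) := by
      have := head_dropWhile_not (fun x => decide (x ∈ ([' ', '(', ':'] : List Char))) c x xs htt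
      simpa using this
    have hA : getFinalLoopA [' ', '(', ':'] (x :: xs) [] =
        getFinalLoopA [' ', '(', ':'] xs [x] := by
      simp [getFinalLoopA, hx]
    have hB := loopB_char ([' ', '(', ':'] : List Char) (x :: xs) 0 (x :: xs) (by simp)
    have h1 : x ≠ ' ' := fun hc => hx (by simp [hc])
    have h2 : x ≠ '(' := fun hc => hx (by simp [hc])
    have h3 : x ≠ ':' := fun hc => hx (by simp [hc])
    rw [hA, loopA_char _ xs [x] (by simp), hB]
    simp [List.any_cons, h1, h2, h3]

-- ===== VERDICT (by name: the statement is the Claim_ definition above) =====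
theorem getFinal_spec : Claim_equal_getFinal := by
  intro b a _
  exact getFinal_eq_on (PySem.List.slice a.toList (some (PySem.Str.len b)) none)
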